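-- pv_equiv track=rewrite | github.com/USYD2020/A2 | assignment2.py | cal_positive_sample
-- ===== SOURCE A (Python) =====
-- def cal_positive_sample(data):
--   segments = data[1][0]
--   qas_list = data[1][1]
--
--   res = []
--   positive_count = {}
--
--   for qas in qas_list:
--     start = qas[1]
--     end = qas[2]
--
--     count = 0
--     if qas[0] not in positive_count: positive_count[qas[0]] = 0
--     if qas[3] == False:
--       for range_seg in segments[0]:
--         l,r = range_seg
--         if (start >= l and start <= r) or (end >= l and end <= r):
--           positive_count[qas[0]] += 1
--     res.append((qas[0],positive_count[qas[0]]))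
--
--   return res
-- ===== SOURCE B (Python) =====
-- def cal_positive_sample(data):
--   # Sort-based counting: sorted endpoint arrays + inclusion-exclusion
--   # (contains(mn) + contains(mx) - both(mn, mx)), then a cumulative pass per name.
--   segments = data[1][0]
--   qas_list = data[1][1]
--   first = segments[0] if segments else []
--
--   # an (l, r) with l > r can never contain a point, so drop it up front
--   valid = [seg for seg in first if seg[0] <= seg[1]]
--   ls = sorted(seg[0] for seg in valid)
--   rs = sorted(seg[1] for seg in valid)
--   by_l = sorted(valid, key=lambda seg: seg[0])
--
--   def count_lt(sorted_xs, x):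
--       # number of entries < x in a nondecreasing list (early exit)
--       c = 0
--       for v in sorted_xs:
--           if v >= x:
--               break
--           c += 1
--       return c
--
--   def contains(p):
--       # segments with l <= p <= r, by endpoint counting
--       return count_lt(ls, p + 1) - count_lt(rs, p)
--
--   def both(mn, mx):
--       # segments with l <= mn and mx <= r: only the l-sorted prefix can qualify
--       k = count_lt(ls, mn + 1)
--       c = 0
--       for seg in by_l[:k]:
--           if seg[1] >= mx:
--               c += 1
--       return c
--
--   res = []
--   totals = {}
--   for name, start, end, flag in qas_list:
--       if flag:
--           d = 0
--       else:
--           mn, mx = (start, end) if start <= end else (end, start)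
--           d = contains(mn) + contains(mx) - both(mn, mx)
--       t = totals.get(name, 0) + d
--       totals[name] = t
--       res.append((name, t))
--   return res
-- ===== Notes on version B (the rewrite author's own statement) =====
-- stated objective: alternative
-- what changed: A scans all segments per query with a compound overlap test while incrementing a dict entry; B sorts the valid segments' endpoint arrays once and answers each query by inclusion-exclusion (contains(mn) + contains(mx) - both(mn,mx)) using early-exit prefix counts on the sorted arrays and a scan of only the l-sorted prefix for the both term, then accumulates per-name totals in a separate cumulative pass.
import Mathlib
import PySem

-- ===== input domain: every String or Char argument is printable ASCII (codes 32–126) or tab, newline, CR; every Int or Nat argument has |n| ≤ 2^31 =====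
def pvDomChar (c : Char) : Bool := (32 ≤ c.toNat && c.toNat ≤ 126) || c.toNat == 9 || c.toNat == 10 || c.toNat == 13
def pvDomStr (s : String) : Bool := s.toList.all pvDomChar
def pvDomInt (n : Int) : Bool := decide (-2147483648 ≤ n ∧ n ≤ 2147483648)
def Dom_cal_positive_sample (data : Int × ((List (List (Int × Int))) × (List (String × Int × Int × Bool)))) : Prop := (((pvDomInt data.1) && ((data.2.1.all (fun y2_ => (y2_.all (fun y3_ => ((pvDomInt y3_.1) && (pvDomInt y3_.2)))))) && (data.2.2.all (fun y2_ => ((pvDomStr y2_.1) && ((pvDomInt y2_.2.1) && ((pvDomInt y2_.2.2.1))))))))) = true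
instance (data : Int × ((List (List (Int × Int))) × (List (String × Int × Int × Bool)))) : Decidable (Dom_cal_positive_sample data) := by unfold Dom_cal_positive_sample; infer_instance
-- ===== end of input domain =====

-- B replaces A's nested scan with a compound predicate by sort-based counting: sorted
-- endpoint arrays, per-query inclusion-exclusion (contains(mn) + contains(mx) - both),
-- prefix counting with early exit, then a separate cumulative pass (alternative algorithm).


-- ===== PORT A =====
def cal_positive_sample (data : Int × ((List (List (Int × Int))) × (List (String × Int × Int × Bool)))) : List (String × Int) :=
  let segments := data.2.1
  let qas_list := data.2.2
  let final := qas_list.foldl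
    (fun (acc : List (String × Int) × PySem.Dict String Int) qas =>
      let start := qas.2.1
      let «end» := qas.2.2.1
      let pc0 := if acc.2.contains qas.1 then acc.2 else acc.2.insert qas.1 0
      let pc1 := if qas.2.2.2 == false then
          -- segments[0]: Pre_ guarantees segments ≠ [] whenever this branch is taken
          (PySem.List.pyGetD segments 0 []).foldl
            (fun d p =>
              if (start ≥ p.1 && start ≤ p.2) || («end» ≥ p.1 && «end» ≤ p.2) then
                d.modify qas.1 0 (· + 1)
              else d) pc0
        else pc0
      (acc.1 ++ [(qas.1, pc1.getD qas.1 0)], pc1))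
    ([], PySem.Dict.empty)
  final.1

-- ===== PORT B =====
-- count_lt: number of entries < x in a nondecreasing list, early exit ('break') as recursion
def pvCountLt (xs : List Int) (x : Int) : Int :=
  match xs with
  | [] => 0
  | v :: t => if v ≥ x then 0 else pvCountLt t x + 1

-- contains(p): segments with l <= p <= r, by endpoint counting
def pvContains (ls rs : List Int) (p : Int) : Int :=
  pvCountLt ls (p + 1) - pvCountLt rs p

-- both(mn, mx): segments with l <= mn and mx <= r, scanning the l-sorted prefix byl[:k]
def pvBoth (ls : List Int) (byl : List (Int × Int)) (mn mx : Int) : Int :=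
  (PySem.List.slice byl none (some (pvCountLt ls (mn + 1)))).foldl
    (fun c seg => if seg.2 ≥ mx then c + 1 else c) 0

def cal_positive_sample_alt (data : Int × ((List (List (Int × Int))) × (List (String × Int × Int × Bool)))) : List (String × Int) :=
  let segments := data.2.1
  let qas_list := data.2.2
  -- first = segments[0] if segments else []
  let first := match segments with | [] => [] | s :: _ => s
  let valid := first.filter (fun seg => decide (seg.1 ≤ seg.2))
  let ls := PySem.List.sorted (valid.map (·.1)) (fun x => x) false
  let rs := PySem.List.sorted (valid.map (·.2)) (fun x => x) false
  let byl := PySem.List.sorted valid (fun seg => seg.1) false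
  let final := qas_list.foldl
    (fun (acc : List (String × Int) × PySem.Dict String Int) q =>
      let d : Int := if q.2.2.2 then 0 else
        let mnmx := if q.2.1 ≤ q.2.2.1 then (q.2.1, q.2.2.1) else (q.2.2.1, q.2.1)
        pvContains ls rs mnmx.1 + pvContains ls rs mnmx.2 - pvBoth ls byl mnmx.1 mnmx.2
      let t := acc.2.getD q.1 0 + d
      (acc.1 ++ [(q.1, t)], acc.2.insert q.1 t))
    ([], PySem.Dict.empty)
  final.1

-- ===== PRECONDITION & SPEC =====
-- Pre_ excludes exactly the inputs where A raises (IndexError): segments == [] while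
-- some query has flag False, so A evaluates segments[0].
def Pre_cal_positive_sample (data : Int × ((List (List (Int × Int))) × (List (String × Int × Int × Bool)))) : Prop :=
  data.2.1 ≠ [] ∨ data.2.2.all (fun q => q.2.2.2) = true
instance (data : Int × ((List (List (Int × Int))) × (List (String × Int × Int × Bool)))) : Decidable (Pre_cal_positive_sample data) := by unfold Pre_cal_positive_sample; infer_instance
def pvWitness_cal_positive_sample : (Int × ((List (List (Int × Int))) × (List (String × Int × Int × Bool)))) :=
  (0, ([[(0, 2)]], [("a", 1, 3, false)]))
def Spec_cal_positive_sample (data : Int × ((List (List (Int × Int))) × (List (String × Int × Int × Bool)))) (out : List (String × Int)) : Prop := out = cal_positive_sample_alt data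
instance (data : Int × ((List (List (Int × Int))) × (List (String × Int × Int × Bool)))) (out : List (String × Int)) : Decidable (Spec_cal_positive_sample data out) := by unfold Spec_cal_positive_sample; infer_instance

-- ===== CLAIM (what is proved, stated in full; the proofs are below) =====
def Claim_equal_cal_positive_sample : Prop := ∀ (data : Int × ((List (List (Int × Int))) × (List (String × Int × Int × Bool)))), Dom_cal_positive_sample data → Pre_cal_positive_sample data → Spec_cal_positive_sample data (cal_positive_sample data)

-- ===== LEMMAS AND PROOFS =====

-- count_lt on a nondecreasing list counts the elements < x
theorem pvCountLt_sorted (xs : List Int) (x : Int) (h : xs.Pairwise (· ≤ ·)) :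
    pvCountLt xs x = (xs.countP (fun v => decide (v < x)) : Int) := by
  induction xs with
  | nil => simp [pvCountLt]
  | cons v t ih =>
    rw [List.pairwise_cons] at h
    by_cases hv : x ≤ v
    · have hz : (v :: t).countP (fun v => decide (v < x)) = 0 := by
        rw [List.countP_eq_zero]
        intro w hw
        rcases List.mem_cons.mp hw with rfl | hw
        · simp only [decide_eq_true_eq]; omega
        · have := h.1 w hw; simp only [decide_eq_true_eq]; omega
      simp [pvCountLt, hv, hz]
    · have hv' : ¬ (v ≥ x) := hv
      have hvx : decide (v < x) = true := by simp only [decide_eq_true_eq]; omega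
      rw [List.countP_cons]
      simp only [pvCountLt, if_neg hv', ih h.2, hvx, if_true]
      push_cast
      ring

-- countP split along a second test
theorem pv_countP_split {α : Type} (l : List α) (p q : α → Bool) :
    l.countP p = l.countP (fun a => p a && q a) + l.countP (fun a => p a && !q a) := by
  induction l with
  | nil => simp
  | cons a t ih =>
    simp only [List.countP_cons, ih]
    cases hp : p a <;> cases hq : q a <;> simp_all <;> omega

-- inclusion-exclusion for countP
theorem pv_countP_union {α : Type} (l : List α) (p q : α → Bool) :
    l.countP (fun a => p a || q a) + l.countP (fun a => p a && q a)
      = l.countP p + l.countP q := by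
  induction l with
  | nil => simp
  | cons a t ih =>
    simp only [List.countP_cons]
    cases hp : p a <;> cases hq : q a <;> simp_all <;> omega

-- on a list sorted by first component, the prefix of length countP(l <= mn) carries
-- exactly the elements with l <= mn
theorem pv_take_countP (l : List (Int × Int)) (mn : Int) (q : Int × Int → Bool)
    (h : l.Pairwise (fun a b => a.1 ≤ b.1)) :
    (l.take (l.countP (fun g => decide (g.1 ≤ mn)))).countP q
      = l.countP (fun g => decide (g.1 ≤ mn) && q g) := by
  induction l with
  | nil => simp
  | cons g t ih =>
    rw [List.pairwise_cons] at h
    by_cases hg : g.1 ≤ mn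
    · have h1 : decide (g.1 ≤ mn) = true := by simpa using hg
      simp only [List.countP_cons, h1, if_true, Bool.true_and]
      rw [List.take_succ_cons, List.countP_cons, ih h.2]
    · have hnot : ∀ w ∈ g :: t, ¬ (w.1 ≤ mn) := by
        intro w hw
        rcases List.mem_cons.mp hw with rfl | hw
        · exact hg
        · have := h.1 w hw; omega
      have hz : (g :: t).countP (fun g => decide (g.1 ≤ mn)) = 0 := by
        rw [List.countP_eq_zero]
        intro w hw
        simpa using hnot w hw
      have hz2 : (g :: t).countP (fun g => decide (g.1 ≤ mn) && q g) = 0 := by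
        rw [List.countP_eq_zero]
        intro w hw
        simp [hnot w hw]
      simp [hz, hz2]

-- contains(p) over the valid list, by endpoint counting
theorem pvContains_eq (valid : List (Int × Int)) (hval : ∀ g ∈ valid, g.1 ≤ g.2) (p : Int) :
    pvContains (PySem.List.sorted (valid.map (·.1)) (fun x => x) false)
               (PySem.List.sorted (valid.map (·.2)) (fun x => x) false) p
      = (valid.countP (fun g => decide (g.1 ≤ p) && decide (p ≤ g.2)) : Int) := by
  unfold pvContains
  rw [pvCountLt_sorted _ _ (PySem.List.sorted_pairwise _ _),
      pvCountLt_sorted _ _ (PySem.List.sorted_pairwise _ _),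
      (PySem.List.sorted_perm _ _ _).countP_eq,
      (PySem.List.sorted_perm _ _ _).countP_eq,
      List.countP_map, List.countP_map]
  have hsplit := pv_countP_split valid (fun g => decide (g.1 < p + 1)) (fun g => decide (p ≤ g.2))
  have h1 : valid.countP (fun g => decide (g.1 < p + 1) && decide (p ≤ g.2))
      = valid.countP (fun g => decide (g.1 ≤ p) && decide (p ≤ g.2)) := by
    apply List.countP_congr
    intro g _
    simp only [Bool.and_eq_true, decide_eq_true_eq]
    omega
  have h2 : valid.countP (fun g => decide (g.1 < p + 1) && !decide (p ≤ g.2))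
      = valid.countP (fun g => decide (g.2 < p)) := by
    apply List.countP_congr
    intro g hg
    have := hval g hg
    simp only [Bool.and_eq_true, Bool.not_eq_eq_eq_not, Bool.not_true, decide_eq_true_eq,
      decide_eq_false_iff_not]
    omega
  have h3 : valid.countP ((fun v => decide (v < p + 1)) ∘ (·.1))
      = valid.countP (fun g => decide (g.1 < p + 1)) := rfl
  have h4 : valid.countP ((fun v => decide (v < p)) ∘ (·.2))
      = valid.countP (fun g => decide (g.2 < p)) := rfl
  rw [h3, h4]
  omega

-- both(mn, mx) over the valid list
theorem pvBoth_eq (valid : List (Int × Int)) (mn mx : Int) :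
    pvBoth (PySem.List.sorted (valid.map (·.1)) (fun x => x) false)
           (PySem.List.sorted valid (fun seg => seg.1) false) mn mx
      = (valid.countP (fun g => decide (g.1 ≤ mn) && decide (mx ≤ g.2)) : Int) := by
  have hk : pvCountLt (PySem.List.sorted (valid.map (·.1)) (fun x => x) false) (mn + 1)
      = ((PySem.List.sorted valid (fun seg => seg.1) false).countP (fun g => decide (g.1 ≤ mn)) : Int) := by
    rw [pvCountLt_sorted _ _ (PySem.List.sorted_pairwise _ _),
        (PySem.List.sorted_perm _ _ _).countP_eq, List.countP_map,
        (PySem.List.sorted_perm valid (fun seg => seg.1) false).countP_eq]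
    have : valid.countP ((fun v => decide (v < mn + 1)) ∘ (·.1))
        = valid.countP (fun g => decide (g.1 ≤ mn)) := by
      apply List.countP_congr
      intro g _
      simp only [Function.comp_apply, decide_eq_true_eq]
      omega
    rw [this]
  unfold pvBoth
  rw [hk, PySem.List.slice_to _ (Int.natCast_nonneg _), Int.toNat_natCast,
      PySem.List.foldl_ite_add_one]
  rw [pv_take_countP _ _ _ (PySem.List.sorted_pairwise _ _),
      (PySem.List.sorted_perm valid (fun seg => seg.1) false).countP_eq]
  simp

-- B's per-query delta, as used by the proofs (B computes ls/rs/byl once; the value is the same)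
def pvDelta (first : List (Int × Int)) (s e : Int) : Int :=
  let valid := first.filter (fun seg => decide (seg.1 ≤ seg.2))
  let ls := PySem.List.sorted (valid.map (·.1)) (fun x => x) false
  let rs := PySem.List.sorted (valid.map (·.2)) (fun x => x) false
  let byl := PySem.List.sorted valid (fun seg => seg.1) false
  let mnmx := if s ≤ e then (s, e) else (e, s)
  pvContains ls rs mnmx.1 + pvContains ls rs mnmx.2 - pvBoth ls byl mnmx.1 mnmx.2

-- the central fact: B's sort-based inclusion-exclusion delta equals A's scan count
theorem pvDelta_eq (first : List (Int × Int)) (s e : Int) :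
    pvDelta first s e
      = (first.countP (fun p => (s ≥ p.1 && s ≤ p.2) || (e ≥ p.1 && e ≤ p.2)) : Int) := by
  simp only [pvDelta]
  have hval : ∀ g ∈ first.filter (fun seg => decide (seg.1 ≤ seg.2)), g.1 ≤ g.2 := by
    intro g hg
    have := List.of_mem_filter hg
    simpa using this
  have hfil : first.countP (fun p => (s ≥ p.1 && s ≤ p.2) || (e ≥ p.1 && e ≤ p.2))
      = (first.filter (fun seg => decide (seg.1 ≤ seg.2))).countP
          (fun p => (s ≥ p.1 && s ≤ p.2) || (e ≥ p.1 && e ≤ p.2)) := by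
    rw [List.countP_filter]
    apply List.countP_congr
    intro g _
    simp [ge_iff_le]; omega
  set valid := first.filter (fun seg => decide (seg.1 ≤ seg.2)) with hv
  rw [hfil]
  -- reduce to ordered endpoints mn ≤ mx
  have key : ∀ mn mx : Int, mn ≤ mx →
      valid.countP (fun p => (mn ≥ p.1 && mn ≤ p.2) || (mx ≥ p.1 && mx ≤ p.2))
        + valid.countP (fun g => decide (g.1 ≤ mn) && decide (mx ≤ g.2))
      = valid.countP (fun g => decide (g.1 ≤ mn) && decide (mn ≤ g.2))
        + valid.countP (fun g => decide (g.1 ≤ mx) && decide (mx ≤ g.2)) := by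
    intro mn mx hmn
    have h1 : valid.countP (fun p => (mn ≥ p.1 && mn ≤ p.2) || (mx ≥ p.1 && mx ≤ p.2))
        = valid.countP (fun g => (decide (g.1 ≤ mn) && decide (mn ≤ g.2))
            || (decide (g.1 ≤ mx) && decide (mx ≤ g.2))) := by
      apply List.countP_congr
      intro g _; simp [ge_iff_le]
    have h2 : valid.countP (fun g => decide (g.1 ≤ mn) && decide (mx ≤ g.2))
        = valid.countP (fun g => (decide (g.1 ≤ mn) && decide (mn ≤ g.2))
            && (decide (g.1 ≤ mx) && decide (mx ≤ g.2))) := by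
      apply List.countP_congr
      intro g _
      simp only [Bool.and_eq_true, decide_eq_true_eq]
      omega
    rw [h1, h2, pv_countP_union]
  by_cases hse : s ≤ e
  · simp only [if_pos hse]
    rw [pvContains_eq valid hval, pvContains_eq valid hval, pvBoth_eq valid]
    have := key s e hse
    omega
  · simp only [if_neg hse]
    rw [pvContains_eq valid hval, pvContains_eq valid hval, pvBoth_eq valid]
    have hmn : e ≤ s := by omega
    have := key e s hmn
    have hsym : valid.countP (fun p => (s ≥ p.1 && s ≤ p.2) || (e ≥ p.1 && e ≤ p.2))
        = valid.countP (fun p => (e ≥ p.1 && e ≤ p.2) || (s ≥ p.1 && s ≤ p.2)) := by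
      apply List.countP_congr
      intro g _
      simp only [Bool.or_eq_true]
      tauto
    omega

-- A's setdefault step preserves every getD-with-default-0 value.
theorem pv_setdefault_getD (d : PySem.Dict String Int) (n k : String) :
    (if d.contains n then d else d.insert n 0).getD k 0 = d.getD k 0 := by
  by_cases h : d.contains n = true
  · simp [h]
  · rw [if_neg (by simp [h]), PySem.Dict.getD_insert]
    split_ifs with hk
    · subst hk
      rw [PySem.Dict.getD_of_not_contains]
      simpa using h
    · rfl

-- A's inner segment loop adds countP to the name's entry and leaves others unchanged.
theorem pv_inner_getD (segs : List (Int × Int)) (c : Int × Int → Bool)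
    (n k : String) (d : PySem.Dict String Int) :
    ((segs.foldl (fun d p => if c p then d.modify n 0 (· + 1) else d) d).getD k 0)
      = d.getD k 0 + (if k = n then (segs.countP c : Int) else 0) := by
  induction segs generalizing d with
  | nil => simp
  | cons p t ih =>
    simp only [List.foldl_cons, List.countP_cons]
    by_cases hc : c p = true
    · rw [if_pos hc, ih, PySem.Dict.getD_modify]
      simp only [hc, if_true]
      split_ifs with hk
      · subst hk; push_cast; ring
      · rfl
    · rw [if_neg hc, ih]; simp [hc]

def pvStepA (segments : List (List (Int × Int)))
    (acc : List (String × Int) × PySem.Dict String Int)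
    (qas : String × Int × Int × Bool) : List (String × Int) × PySem.Dict String Int :=
  let start := qas.2.1
  let «end» := qas.2.2.1
  let pc0 := if acc.2.contains qas.1 then acc.2 else acc.2.insert qas.1 0
  let pc1 := if qas.2.2.2 == false then
      (PySem.List.pyGetD segments 0 []).foldl
        (fun d p =>
          if (start ≥ p.1 && start ≤ p.2) || («end» ≥ p.1 && «end» ≤ p.2) then
            d.modify qas.1 0 (· + 1)
          else d) pc0
    else pc0
  (acc.1 ++ [(qas.1, pc1.getD qas.1 0)], pc1)

def pvStepB (delta : Int → Int → Int)
    (acc : List (String × Int) × PySem.Dict String Int)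
    (q : String × Int × Int × Bool) : List (String × Int) × PySem.Dict String Int :=
  let d : Int := if q.2.2.2 then 0 else delta q.2.1 q.2.2.1
  let t := acc.2.getD q.1 0 + d
  (acc.1 ++ [(q.1, t)], acc.2.insert q.1 t)

theorem pvA_eq (data : Int × ((List (List (Int × Int))) × (List (String × Int × Int × Bool)))) :
    cal_positive_sample data = (data.2.2.foldl (pvStepA data.2.1) ([], PySem.Dict.empty)).1 := rfl

theorem pvB_eq (data : Int × ((List (List (Int × Int))) × (List (String × Int × Int × Bool)))) :
    cal_positive_sample_alt data
      = (data.2.2.foldl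
          (pvStepB (pvDelta (match data.2.1 with | [] => [] | s :: _ => s)))
          ([], PySem.Dict.empty)).1 := rfl

-- B's 'first' and A's pyGetD segments 0 [] coincide as Lean lists (pyGetD defaults to [] on [])
theorem pv_first_eq (segments : List (List (Int × Int))) :
    (match segments with | [] => [] | s :: _ => s) = PySem.List.pyGetD segments 0 [] := by
  cases segments with
  | nil => simp [PySem.List.pyGetD, PySem.List.pyGet?, PySem.List.pyIdx?]
  | cons s t => simp [PySem.List.pyGetD, PySem.List.pyGet?, PySem.List.pyIdx?]

theorem pv_main (segments : List (List (Int × Int))) (delta : Int → Int → Int)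
    (hdelta : ∀ s e, delta s e
      = ((PySem.List.pyGetD segments 0 []).countP
          (fun p => (s ≥ p.1 && s ≤ p.2) || (e ≥ p.1 && e ≤ p.2)) : Int))
    (qas : List (String × Int × Int × Bool))
    (res : List (String × Int)) (dA dB : PySem.Dict String Int)
    (h : ∀ k, dA.getD k 0 = dB.getD k 0) :
    (qas.foldl (pvStepA segments) (res, dA)).1 = (qas.foldl (pvStepB delta) (res, dB)).1 := by
  induction qas generalizing res dA dB with
  | nil => rfl
  | cons q t ih =>
    simp only [List.foldl_cons]
    have hd : ∀ k, (if q.2.2.2 = false then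
        (PySem.List.pyGetD segments 0 []).foldl
          (fun d p =>
            if (q.2.1 ≥ p.1 && q.2.1 ≤ p.2) || (q.2.2.1 ≥ p.1 && q.2.2.1 ≤ p.2) then
              d.modify q.1 0 (· + 1)
            else d)
          (if dA.contains q.1 then dA else dA.insert q.1 0)
      else (if dA.contains q.1 then dA else dA.insert q.1 0)).getD k 0
        = (dB.insert q.1 (dB.getD q.1 0 +
            (if q.2.2.2 then (0 : Int) else delta q.2.1 q.2.2.1))).getD k 0 := by
      intro k
      rw [PySem.Dict.getD_insert]
      by_cases hf : q.2.2.2 = true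
      · simp only [hf, if_true, Bool.true_eq_false, if_false]
        rw [pv_setdefault_getD, h k]
        split_ifs with hk
        · subst hk; ring
        · rfl
      · have hf' : q.2.2.2 = false := by simpa using hf
        simp only [hf', if_true, Bool.false_eq_true, if_false]
        rw [pv_inner_getD, pv_setdefault_getD, h k, hdelta]
        split_ifs with hk
        · subst hk; ring
        · ring
    have hstep : pvStepA segments (res, dA) q
        = ((pvStepB delta (res, dB) q).1,
           (if q.2.2.2 = false then
              (PySem.List.pyGetD segments 0 []).foldl
                (fun d p =>
                  if (q.2.1 ≥ p.1 && q.2.1 ≤ p.2) || (q.2.2.1 ≥ p.1 && q.2.2.1 ≤ p.2) then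
                    d.modify q.1 0 (· + 1)
                  else d)
                (if dA.contains q.1 then dA else dA.insert q.1 0)
            else (if dA.contains q.1 then dA else dA.insert q.1 0))) := by
      unfold pvStepA pvStepB
      simp only [beq_iff_eq]
      congr 2
      · have := hd q.1
        rw [PySem.Dict.getD_insert] at this
        simpa using this
    rw [hstep]
    have := ih (pvStepB delta (res, dB) q).1
      (if q.2.2.2 = false then
          (PySem.List.pyGetD segments 0 []).foldl
            (fun d p =>
              if (q.2.1 ≥ p.1 && q.2.1 ≤ p.2) || (q.2.2.1 ≥ p.1 && q.2.2.1 ≤ p.2) then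
                d.modify q.1 0 (· + 1)
              else d)
            (if dA.contains q.1 then dA else dA.insert q.1 0)
        else (if dA.contains q.1 then dA else dA.insert q.1 0))
      (pvStepB delta (res, dB) q).2 (by
        intro k
        have := hd k
        unfold pvStepB
        simpa using this)
    simpa using this

-- ===== VERDICT (by name: the statement is the Claim_ definition above) =====
theorem cal_positive_sample_spec : Claim_equal_cal_positive_sample := by
  intro data _ _
  unfold Spec_cal_positive_sample
  rw [pvA_eq, pvB_eq]
  exact pv_main data.2.1 _
    (fun s e => by rw [pvDelta_eq, pv_first_eq])
    data.2.2 [] _ _ (fun k => rfl)
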